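-- pv_equiv track=rewrite | github.com/levishilf/RenderDocMCP | renderdoc_extension/services/pipeline_service.py | _pick_best_disassembly_target
-- ===== SOURCE A (Python) =====
-- def _pick_best_disassembly_target(targets):
--     """Pick the most human-readable disassembly target.
--
--     Priority order:
--     1. GLSL (cross-compiled from SPIR-V, most readable for mobile)
--     2. HLSL (cross-compiled, readable for desktop)
--     3. Anything that looks like high-level source
--     4. SPIR-V (IL) as fallback
--     5. First available target as last resort
--     """
--     targets_lower = [(t, t.lower()) for t in targets]
--
--     # Prefer GLSL cross-compiled
--     for t, tl in targets_lower:
--         if "glsl" in tl and ("cross" in tl or "compil" in tl):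
--             return t
--
--     # Then plain GLSL
--     for t, tl in targets_lower:
--         if "glsl" in tl:
--             return t
--
--     # Then HLSL cross-compiled
--     for t, tl in targets_lower:
--         if "hlsl" in tl and ("cross" in tl or "compil" in tl):
--             return t
--
--     # Then plain HLSL
--     for t, tl in targets_lower:
--         if "hlsl" in tl:
--             return t
--
--     # Skip raw IL targets, look for anything else
--     for t, tl in targets_lower:
--         if "il" not in tl and "bytecode" not in tl and "binary" not in tl:
--             return t
--
--     # Fallback: first target
--     return targets[0]
-- ===== SOURCE B (Python) =====
-- def _rank(t):
--     tl = t.lower()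
--     if "glsl" in tl and ("cross" in tl or "compil" in tl):
--         return 1
--     if "glsl" in tl:
--         return 2
--     if "hlsl" in tl and ("cross" in tl or "compil" in tl):
--         return 3
--     if "hlsl" in tl:
--         return 4
--     if "il" not in tl and "bytecode" not in tl and "binary" not in tl:
--         return 5
--     return 6
--
--
-- def _pick_best_disassembly_target(targets):
--     best = targets[0]
--     best_rank = _rank(best)
--     for t in targets[1:]:
--         r = _rank(t)
--         if r < best_rank:
--             best, best_rank = t, r
--     return best
-- ===== Notes on version B (the rewrite author's own statement) =====
-- stated objective: simpler
-- what changed: Replaces A's five sequential priority scans over the list with a single readability-rank function and one pass that keeps the earliest minimum-rank target.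
import Mathlib
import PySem

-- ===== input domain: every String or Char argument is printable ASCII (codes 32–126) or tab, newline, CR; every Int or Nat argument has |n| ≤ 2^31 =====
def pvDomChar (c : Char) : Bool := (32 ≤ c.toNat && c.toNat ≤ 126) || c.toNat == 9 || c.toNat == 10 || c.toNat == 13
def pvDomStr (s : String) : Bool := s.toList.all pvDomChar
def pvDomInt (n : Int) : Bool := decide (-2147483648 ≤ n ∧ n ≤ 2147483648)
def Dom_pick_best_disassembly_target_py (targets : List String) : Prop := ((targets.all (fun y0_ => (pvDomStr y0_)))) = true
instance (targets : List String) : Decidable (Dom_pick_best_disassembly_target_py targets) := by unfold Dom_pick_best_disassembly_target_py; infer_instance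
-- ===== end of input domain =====

-- B replaces A's five sequential priority scans with a readability rank and one pass keeping the
-- earliest minimum-rank target (objective: simpler).

-- ===== PORT A =====
def pick_best_disassembly_target_py (targets : List String) : String :=
  let targets_lower := targets.map (fun t => (t, PySem.Str.lower t))
  match targets_lower.find? (fun p =>
      PySem.Str.isIn "glsl" p.2 && (PySem.Str.isIn "cross" p.2 || PySem.Str.isIn "compil" p.2)) with
  | some p => p.1
  | none =>
  match targets_lower.find? (fun p => PySem.Str.isIn "glsl" p.2) with
  | some p => p.1
  | none =>
  match targets_lower.find? (fun p =>
      PySem.Str.isIn "hlsl" p.2 && (PySem.Str.isIn "cross" p.2 || PySem.Str.isIn "compil" p.2)) with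
  | some p => p.1
  | none =>
  match targets_lower.find? (fun p => PySem.Str.isIn "hlsl" p.2) with
  | some p => p.1
  | none =>
  match targets_lower.find? (fun p =>
      !PySem.Str.isIn "il" p.2 && !PySem.Str.isIn "bytecode" p.2 && !PySem.Str.isIn "binary" p.2) with
  | some p => p.1
  | none =>
  -- targets[0]; none = IndexError (empty list), excluded by Pre_
  match PySem.List.pyGet? targets 0 with
  | some t => t
  | none => ""

-- ===== PORT B =====
def pvRank (t : String) : Int :=
  let tl := PySem.Str.lower t
  if PySem.Str.isIn "glsl" tl && (PySem.Str.isIn "cross" tl || PySem.Str.isIn "compil" tl) then 1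
  else if PySem.Str.isIn "glsl" tl then 2
  else if PySem.Str.isIn "hlsl" tl && (PySem.Str.isIn "cross" tl || PySem.Str.isIn "compil" tl) then 3
  else if PySem.Str.isIn "hlsl" tl then 4
  else if !PySem.Str.isIn "il" tl && !PySem.Str.isIn "bytecode" tl && !PySem.Str.isIn "binary" tl then 5
  else 6

def pick_best_disassembly_target_py_alt (targets : List String) : String :=
  match targets with
  | [] => ""  -- targets[0] = IndexError in Python; excluded by Pre_
  | t0 :: rest =>
    (rest.foldl
      (fun (acc : String × Int) t => if pvRank t < acc.2 then (t, pvRank t) else acc)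
      (t0, pvRank t0)).1

-- ===== PRECONDITION & SPEC =====
-- Pre_ excludes only the empty list, on which the Python A raises IndexError (targets[0]).
def Pre_pick_best_disassembly_target_py (targets : List String) : Prop := targets ≠ []
instance (targets : List String) : Decidable (Pre_pick_best_disassembly_target_py targets) := by
  unfold Pre_pick_best_disassembly_target_py; infer_instance
def pvWitness_pick_best_disassembly_target_py : List String := ["SPIR-V IL", "GLSL (cross-compiled)"]
def Spec_pick_best_disassembly_target_py (targets : List String) (out : String) : Prop := out = pick_best_disassembly_target_py_alt targets
instance (targets : List String) (out : String) : Decidable (Spec_pick_best_disassembly_target_py targets out) := by unfold Spec_pick_best_disassembly_target_py; infer_instance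

-- ===== CLAIM (what is proved, stated in full; the proofs are below) =====
def Claim_equal_pick_best_disassembly_target_py : Prop := ∀ (targets : List String), Dom_pick_best_disassembly_target_py targets → Pre_pick_best_disassembly_target_py targets → Spec_pick_best_disassembly_target_py targets (pick_best_disassembly_target_py targets)

-- ===== LEMMAS AND PROOFS =====

-- recursive form of B's fold (first element of minimal rank, earliest wins)
def pvFM : String → List String → String
  | a, [] => a
  | a, x :: xs => if pvRank x < pvRank a then pvFM x xs else pvFM a xs

theorem pvFold_eq_fm (xs : List String) : ∀ a : String,
    xs.foldl (fun (acc : String × Int) t => if pvRank t < acc.2 then (t, pvRank t) else acc)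
      (a, pvRank a) = (pvFM a xs, pvRank (pvFM a xs)) := by
  induction xs with
  | nil => intro a; simp [pvFM]
  | cons x xs ih =>
    intro a
    simp only [List.foldl_cons, pvFM]
    by_cases h : pvRank x < pvRank a
    · simp [h, ih x]
    · simp [h, ih a]

theorem pvFM_min (xs : List String) : ∀ a t : String, t ∈ a :: xs → pvRank (pvFM a xs) ≤ pvRank t := by
  induction xs with
  | nil =>
    intro a t ht
    simp only [List.mem_cons, List.not_mem_nil, or_false] at ht
    subst ht; simp [pvFM]
  | cons x xs ih =>
    intro a t ht
    simp only [List.mem_cons] at ht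
    simp only [pvFM]
    by_cases h : pvRank x < pvRank a
    · rw [if_pos h]
      have hx := ih x x (by simp)
      rcases ht with rfl | rfl | ht
      · omega
      · exact hx
      · exact ih x t (List.mem_cons_of_mem x ht)
    · rw [if_neg h]
      have ha := ih a a (by simp)
      rcases ht with rfl | rfl | ht
      · exact ha
      · omega
      · exact ih a t (List.mem_cons_of_mem a ht)

theorem pvFM_cons_lt (x a : String) (xs : List String) (h : pvRank x < pvRank a) :
    pvFM a (x :: xs) = pvFM x xs := by
  simp [pvFM, h]

theorem pvFM_cons_ge (x a : String) (xs : List String) (h : ¬ pvRank x < pvRank a) :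
    pvFM a (x :: xs) = pvFM a xs := by
  simp [pvFM, h]

theorem pvFM_first (xs : List String) : ∀ a : String,
    (a :: xs).find? (fun t => decide (pvRank t ≤ pvRank (pvFM a xs))) = some (pvFM a xs) := by
  induction xs with
  | nil => intro a; simp [pvFM]
  | cons x xs ih =>
    intro a
    by_cases h : pvRank x < pvRank a
    · have hc := pvFM_min xs x x (by simp)
      have hneg : ¬ ((fun t => decide (pvRank t ≤ pvRank (pvFM x xs))) a = true) := by
        simp only [decide_eq_true_eq]; omega
      rw [pvFM_cons_lt x a xs h, List.find?_cons_of_neg (p := fun t => decide (pvRank t ≤ pvRank (pvFM x xs))) hneg]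
      exact ih x
    · rw [pvFM_cons_ge x a xs h]
      have hIH := ih a
      have hca := pvFM_min xs a a (by simp)
      by_cases ha : pvRank a ≤ pvRank (pvFM a xs)
      · have hpos : ((fun t => decide (pvRank t ≤ pvRank (pvFM a xs))) a = true) := by
          simp only [decide_eq_true_eq]; omega
        have hfa : pvFM a xs = a := by
          rw [List.find?_cons_of_pos (p := fun t => decide (pvRank t ≤ pvRank (pvFM a xs))) hpos] at hIH
          exact (Option.some_inj.mp hIH).symm
        rw [List.find?_cons_of_pos (p := fun t => decide (pvRank t ≤ pvRank (pvFM a xs))) hpos]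
        exact congrArg some hfa.symm
      · have hnega : ¬ ((fun t => decide (pvRank t ≤ pvRank (pvFM a xs))) a = true) := by
          simp only [decide_eq_true_eq]; omega
        have hnegx : ¬ ((fun t => decide (pvRank t ≤ pvRank (pvFM a xs))) x = true) := by
          simp only [decide_eq_true_eq]; omega
        rw [List.find?_cons_of_neg (p := fun t => decide (pvRank t ≤ pvRank (pvFM a xs))) hnega] at hIH
        rw [List.find?_cons_of_neg (p := fun t => decide (pvRank t ≤ pvRank (pvFM a xs))) hnega,
            List.find?_cons_of_neg (p := fun t => decide (pvRank t ≤ pvRank (pvFM a xs))) hnegx]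
        exact hIH

theorem pvFM_const (xs : List String) : ∀ a : String,
    (∀ x ∈ xs, ¬ pvRank x < pvRank a) → pvFM a xs = a := by
  induction xs with
  | nil => intro a _; rfl
  | cons y ys ih =>
    intro a h
    rw [pvFM, if_neg (h y (by simp))]
    exact ih a (fun x hx => h x (List.mem_cons_of_mem y hx))

theorem pvRank_bounds (t : String) : 1 ≤ pvRank t ∧ pvRank t ≤ 6 := by
  simp only [pvRank]
  split_ifs <;> omega

-- predicate ↔ rank, one direction each
theorem pvQ1_rank (t : String) :
    (PySem.Str.isIn "glsl" (PySem.Str.lower t) && (PySem.Str.isIn "cross" (PySem.Str.lower t) || PySem.Str.isIn "compil" (PySem.Str.lower t))) = true ↔ pvRank t = 1 := by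
  simp only [pvRank]; split_ifs with h <;> simp_all
theorem pvQ2_rank (t : String) :
    (PySem.Str.isIn "glsl" (PySem.Str.lower t)) = true ↔ pvRank t ≤ 2 := by
  simp only [pvRank]; split_ifs with h1 h2 <;> simp_all
theorem pvQ3_rank_fwd (t : String) (h : (PySem.Str.isIn "hlsl" (PySem.Str.lower t) && (PySem.Str.isIn "cross" (PySem.Str.lower t) || PySem.Str.isIn "compil" (PySem.Str.lower t))) = true) : pvRank t ≤ 3 := by
  simp only [pvRank]; split_ifs <;> simp_all
theorem pvQ3_rank_bwd (t : String) (h : pvRank t = 3) :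
    (PySem.Str.isIn "hlsl" (PySem.Str.lower t) && (PySem.Str.isIn "cross" (PySem.Str.lower t) || PySem.Str.isIn "compil" (PySem.Str.lower t))) = true := by
  revert h; simp only [pvRank]; split_ifs <;> simp_all
theorem pvQ4_rank_fwd (t : String) (h : (PySem.Str.isIn "hlsl" (PySem.Str.lower t)) = true) : pvRank t ≤ 4 := by
  simp only [pvRank]; split_ifs <;> simp_all
theorem pvQ4_rank_bwd (t : String) (h : pvRank t = 4) : (PySem.Str.isIn "hlsl" (PySem.Str.lower t)) = true := by
  revert h; simp only [pvRank]; split_ifs <;> simp_all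
theorem pvQ5_rank_fwd (t : String) (h : (!PySem.Str.isIn "il" (PySem.Str.lower t) && !PySem.Str.isIn "bytecode" (PySem.Str.lower t) && !PySem.Str.isIn "binary" (PySem.Str.lower t)) = true) : pvRank t ≤ 5 := by
  simp only [pvRank]; split_ifs <;> simp_all
theorem pvQ5_rank_bwd (t : String) (h : pvRank t = 5) :
    (!PySem.Str.isIn "il" (PySem.Str.lower t) && !PySem.Str.isIn "bytecode" (PySem.Str.lower t) && !PySem.Str.isIn "binary" (PySem.Str.lower t)) = true := by
  revert h; simp only [pvRank]; split_ifs <;> simp_all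

theorem pv_find?_congr {α : Type} (l : List α) (p q : α → Bool) (h : ∀ x ∈ l, p x = q x) :
    l.find? p = l.find? q := by
  induction l with
  | nil => rfl
  | cons x xs ih =>
    simp only [List.find?_cons, h x (by simp)]
    split
    · rfl
    · exact ih fun y hy => h y (by simp [hy])

-- ===== VERDICT (by name: the statement is the Claim_ definition above) =====
theorem pick_best_disassembly_target_py_spec : Claim_equal_pick_best_disassembly_target_py := by
  intro targets _ hpre
  unfold Spec_pick_best_disassembly_target_py
  match targets, hpre with
  | t0 :: rest, _ =>
  simp only [pick_best_disassembly_target_py_alt, pick_best_disassembly_target_py]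
  rw [pvFold_eq_fm]
  set c := pvFM t0 rest with hc
  set l := t0 :: rest with hl
  have hmin : ∀ t ∈ l, pvRank c ≤ pvRank t := fun t ht => pvFM_min rest t0 t ht
  have hfirst : l.find? (fun t => decide (pvRank t ≤ pvRank c)) = some c := pvFM_first rest t0
  obtain ⟨hcb1, hcb2⟩ := pvRank_bounds c
  have hmap : ∀ (p : String × String → Bool),
      (l.map (fun t => (t, PySem.Str.lower t))).find? p
        = (l.find? (fun t => p (t, PySem.Str.lower t))).map (fun t => (t, PySem.Str.lower t)) := by
    intro p; exact List.find?_map ..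
  have hnone1 : pvRank c > 1 → l.find? (fun t => PySem.Str.isIn "glsl" (PySem.Str.lower t) && (PySem.Str.isIn "cross" (PySem.Str.lower t) || PySem.Str.isIn "compil" (PySem.Str.lower t))) = none := by
    intro hgt; apply List.find?_eq_none.mpr; intro t ht hq
    have := (pvQ1_rank t).mp hq; have := hmin t ht; omega
  have hnone2 : pvRank c > 2 → l.find? (fun t => PySem.Str.isIn "glsl" (PySem.Str.lower t)) = none := by
    intro hgt; apply List.find?_eq_none.mpr; intro t ht hq
    have := (pvQ2_rank t).mp hq; have := hmin t ht; omega
  have hnone3 : pvRank c > 3 → l.find? (fun t => PySem.Str.isIn "hlsl" (PySem.Str.lower t) && (PySem.Str.isIn "cross" (PySem.Str.lower t) || PySem.Str.isIn "compil" (PySem.Str.lower t))) = none := by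
    intro hgt; apply List.find?_eq_none.mpr; intro t ht hq
    have := pvQ3_rank_fwd t hq; have := hmin t ht; omega
  have hnone4 : pvRank c > 4 → l.find? (fun t => PySem.Str.isIn "hlsl" (PySem.Str.lower t)) = none := by
    intro hgt; apply List.find?_eq_none.mpr; intro t ht hq
    have := pvQ4_rank_fwd t hq; have := hmin t ht; omega
  have hnone5 : pvRank c > 5 → l.find? (fun t => !PySem.Str.isIn "il" (PySem.Str.lower t) && !PySem.Str.isIn "bytecode" (PySem.Str.lower t) && !PySem.Str.isIn "binary" (PySem.Str.lower t)) = none := by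
    intro hgt; apply List.find?_eq_none.mpr; intro t ht hq
    have := pvQ5_rank_fwd t hq; have := hmin t ht; omega
  simp only [hmap]
  have hcases : pvRank c = 1 ∨ pvRank c = 2 ∨ pvRank c = 3 ∨ pvRank c = 4 ∨ pvRank c = 5 ∨ pvRank c = 6 := by omega
  rcases hcases with hm | hm | hm | hm | hm | hm
  · -- rank 1
    have h1 : l.find? (fun t => PySem.Str.isIn "glsl" (PySem.Str.lower t) && (PySem.Str.isIn "cross" (PySem.Str.lower t) || PySem.Str.isIn "compil" (PySem.Str.lower t))) = some c := by
      rw [pv_find?_congr l _ (fun t => decide (pvRank t ≤ pvRank c)), hfirst]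
      intro t ht
      obtain ⟨hb1, hb2⟩ := pvRank_bounds t
      have hmt := hmin t ht
      by_cases hq : pvRank t = 1
      · rw [(pvQ1_rank t).mpr hq, decide_eq_true (by omega)]
      · rw [Bool.eq_false_iff.mpr (fun hh => hq ((pvQ1_rank t).mp hh)),
            decide_eq_false (by omega)]
    rw [h1]; rfl
  · -- rank 2
    have h2 : l.find? (fun t => PySem.Str.isIn "glsl" (PySem.Str.lower t)) = some c := by
      rw [pv_find?_congr l _ (fun t => decide (pvRank t ≤ pvRank c)), hfirst]
      intro t ht
      have hmt := hmin t ht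
      by_cases hq : pvRank t ≤ 2
      · rw [(pvQ2_rank t).mpr hq, decide_eq_true (by omega)]
      · rw [Bool.eq_false_iff.mpr (fun hh => hq ((pvQ2_rank t).mp hh)),
            decide_eq_false (by omega)]
    rw [hnone1 (by omega), h2]; rfl
  · -- rank 3
    have h3 : l.find? (fun t => PySem.Str.isIn "hlsl" (PySem.Str.lower t) && (PySem.Str.isIn "cross" (PySem.Str.lower t) || PySem.Str.isIn "compil" (PySem.Str.lower t))) = some c := by
      rw [pv_find?_congr l _ (fun t => decide (pvRank t ≤ pvRank c)), hfirst]
      intro t ht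
      have hmt := hmin t ht
      by_cases hq : pvRank t = 3
      · rw [pvQ3_rank_bwd t hq, decide_eq_true (by omega)]
      · rw [Bool.eq_false_iff.mpr (fun hh => hq (le_antisymm (pvQ3_rank_fwd t hh) (by omega))),
            decide_eq_false (by omega)]
    rw [hnone1 (by omega), hnone2 (by omega), h3]; rfl
  · -- rank 4
    have h4 : l.find? (fun t => PySem.Str.isIn "hlsl" (PySem.Str.lower t)) = some c := by
      rw [pv_find?_congr l _ (fun t => decide (pvRank t ≤ pvRank c)), hfirst]
      intro t ht
      have hmt := hmin t ht
      by_cases hq : pvRank t = 4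
      · rw [pvQ4_rank_bwd t hq, decide_eq_true (by omega)]
      · rw [Bool.eq_false_iff.mpr (fun hh => hq (le_antisymm (pvQ4_rank_fwd t hh) (by omega))),
            decide_eq_false (by omega)]
    rw [hnone1 (by omega), hnone2 (by omega), hnone3 (by omega), h4]; rfl
  · -- rank 5
    have h5 : l.find? (fun t => !PySem.Str.isIn "il" (PySem.Str.lower t) && !PySem.Str.isIn "bytecode" (PySem.Str.lower t) && !PySem.Str.isIn "binary" (PySem.Str.lower t)) = some c := by
      rw [pv_find?_congr l _ (fun t => decide (pvRank t ≤ pvRank c)), hfirst]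
      intro t ht
      have hmt := hmin t ht
      by_cases hq : pvRank t = 5
      · rw [pvQ5_rank_bwd t hq, decide_eq_true (by omega)]
      · rw [Bool.eq_false_iff.mpr (fun hh => hq (le_antisymm (pvQ5_rank_fwd t hh) (by omega))),
            decide_eq_false (by omega)]
    rw [hnone1 (by omega), hnone2 (by omega), hnone3 (by omega), hnone4 (by omega), h5]; rfl
  · -- rank 6: all scans fail, fallback targets[0] = t0; and c = t0 since no rank beats t0's
    have hct0 : c = t0 := by
      rw [hc]
      apply pvFM_const
      intro x hx hlt
      have h1 := hmin x (by simp [hl, hx])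
      have h2 := (pvRank_bounds t0).2
      omega
    rw [hnone1 (by omega), hnone2 (by omega), hnone3 (by omega), hnone4 (by omega),
      hnone5 (by omega), hct0, hl]
    simp [PySem.List.pyGet?, PySem.List.pyIdx?]
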